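-- pv_equiv track=rewrite | github.com/rhinlopen/internship-data | A3_command.py | divide_command
-- ===== SOURCE A (Python) =====
-- def is_legal (char):
--     #   precondition
--     assert(char.__class__ == str)
--     assert(len(char) == 1)
--     #   postcondition
--     # return true if the char is legal, else false.
--
--     # only non-caps (97-122), numbers (48-57) and . - (46, ?) are allowed characters.
--     if char == '.' or char == '-':
--         return True
--
--     if ord(char) > 122:
--         return False
--
--     if ord(char) > 57 and ord(char) < 97:
--         return False
--
--     if ord(char) < 48:
--         return False
--
--     return True
--
-- def divide_command (command):
--     #   precondition
--     assert(command.__class__ == str)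
--     #   postcondition
--     # divide command into array elements, seperated by one/more illegal characters.
--
--     split_command = []
--     start_index, moving_index = 0, 0
--
--     # seperate all words/instances of legal characters.
--     while moving_index < len(command):
--         if not is_legal(command[moving_index]) and moving_index == start_index:
--             start_index = moving_index + 1
--
--         elif not is_legal(command[moving_index]):
--             split_command.append( command[start_index:moving_index] )
--             start_index = moving_index + 1
--
--         moving_index += 1
--
--     # Add the final piece to the command.
--     if start_index != moving_index:
--         split_command.append( command[start_index:] )
--
--     return split_command
-- ===== SOURCE B (Python) =====
-- from itertools import groupby
--
-- def is_legal(char):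
--     assert(char.__class__ == str)
--     assert(len(char) == 1)
--     if char == '.' or char == '-':
--         return True
--     if ord(char) > 122:
--         return False
--     if ord(char) > 57 and ord(char) < 97:
--         return False
--     if ord(char) < 48:
--         return False
--     return True
--
-- def divide_command(command):
--     assert(command.__class__ == str)
--     return [''.join(g) for k, g in groupby(command, key=is_legal) if k]
-- ===== Notes on version B (the rewrite author's own statement) =====
-- stated objective: idiomatic
-- what changed: Replaced the two-index while-loop scan with itertools.groupby keyed on is_legal: legal-keyed runs are joined into tokens and illegal runs are discarded.
import Mathlib
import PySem

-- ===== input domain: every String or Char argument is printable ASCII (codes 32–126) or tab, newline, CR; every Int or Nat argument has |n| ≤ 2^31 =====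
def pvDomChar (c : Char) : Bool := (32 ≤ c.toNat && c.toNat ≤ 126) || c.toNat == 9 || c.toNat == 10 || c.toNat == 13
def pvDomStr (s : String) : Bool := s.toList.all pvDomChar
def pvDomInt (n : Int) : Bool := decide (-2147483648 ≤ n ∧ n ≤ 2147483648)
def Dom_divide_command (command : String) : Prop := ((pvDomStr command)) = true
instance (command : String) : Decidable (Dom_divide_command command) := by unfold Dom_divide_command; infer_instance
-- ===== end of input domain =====

-- B replaces A's two-index while-loop with a run-based grouping (itertools.groupby keyed on
-- is_legal): same return value, more idiomatic decomposition.

-- ===== PORT A =====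
-- is_legal, transliterated branch for branch (Char.toNat = Python ord on these inputs).
def is_legal (c : Char) : Bool :=
  if c = '.' ∨ c = '-' then true
  else if c.toNat > 122 then false
  else if c.toNat > 57 ∧ c.toNat < 97 then false
  else if c.toNat < 48 then false
  else true

-- the while loop of A; command[start:moving] with 0 ≤ start ≤ moving ≤ len is exactly
-- (cs.take moving).drop start, and command[start:] is cs.drop start.
def aLoop (cs : List Char) (start moving : Nat) (acc : List String) : List String :=
  if h : moving < cs.length then
    if ¬ is_legal cs[moving] ∧ moving = start then
      aLoop cs (moving + 1) (moving + 1) acc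
    else if ¬ is_legal cs[moving] then
      aLoop cs (moving + 1) (moving + 1) (acc ++ [String.ofList ((cs.take moving).drop start)])
    else
      aLoop cs start (moving + 1) acc
  else
    if start ≠ moving then acc ++ [String.ofList (cs.drop start)] else acc
termination_by cs.length - moving

def divide_command (command : String) : List String :=
  aLoop command.toList 0 0 []

-- ===== PORT B =====
-- one groupby group at a time: a legal run becomes a token, an illegal run is discarded.
def bGroup (cs : List Char) : List String :=
  match cs with
  | [] => []
  | c :: rest =>
    if is_legal c then
      String.ofList (c :: rest.takeWhile is_legal) :: bGroup (rest.dropWhile is_legal)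
    else
      bGroup (rest.dropWhile (fun x => ¬ is_legal x))
termination_by cs.length
decreasing_by
  · exact Nat.lt_succ_of_le (rest.length_dropWhile_le _)
  · exact Nat.lt_succ_of_le (rest.length_dropWhile_le _)

def divide_command_alt (command : String) : List String :=
  bGroup command.toList

-- ===== PRECONDITION & SPEC =====
def Spec_divide_command (command : String) (out : List String) : Prop := out = divide_command_alt command
instance (command : String) (out : List String) : Decidable (Spec_divide_command command out) := by unfold Spec_divide_command; infer_instance

-- ===== CLAIM (what is proved, stated in full; the proofs are below) =====
def Claim_equal_divide_command : Prop := ∀ (command : String), Dom_divide_command command → Spec_divide_command command (divide_command command)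

-- ===== LEMMAS AND PROOFS =====

theorem bGroup_dropWhile_illegal (r : List Char) :
    bGroup (r.dropWhile (fun x => ¬ is_legal x)) = bGroup r := by
  induction r with
  | nil => rfl
  | cons d r ih =>
    by_cases hd : is_legal d = true
    · simp [hd]
    · rw [List.dropWhile_cons, if_pos (by simp [hd])]
      conv_rhs => rw [bGroup]
      simp [hd]

theorem bGroup_illegal_cons (c : Char) (r : List Char) (h : ¬ is_legal c = true) :
    bGroup (c :: r) = bGroup r := by
  rw [bGroup]
  simp only [h, if_false, Bool.false_eq_true]
  exact bGroup_dropWhile_illegal r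

theorem aLoop_eq (n : Nat) : ∀ (cs : List Char) (start moving : Nat) (acc : List String),
    cs.length - moving = n → start ≤ moving → moving ≤ cs.length →
    aLoop cs start moving acc = acc ++
      (if start = moving then bGroup (cs.drop moving)
       else String.ofList (((cs.take moving).drop start) ++ (cs.drop moving).takeWhile is_legal)
              :: bGroup ((cs.drop moving).dropWhile is_legal)) := by
  induction n with
  | zero =>
    intro cs start moving acc hn hsm hml
    have hm : moving = cs.length := by omega
    rw [aLoop, dif_neg (by omega)]
    subst hm
    simp only [List.drop_length, List.takeWhile_nil, List.dropWhile_nil, List.append_nil, bGroup]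
    by_cases h : start = cs.length
    · simp [h]
    · simp only [h, if_false, ne_eq, not_false_iff, if_true]
      rw [List.take_length]
  | succ n ih =>
    intro cs start moving acc hn hsm hml
    have hm : moving < cs.length := by omega
    have hdrop : cs.drop moving = cs[moving] :: cs.drop (moving + 1) :=
      List.drop_eq_getElem_cons hm
    have htake : ∀ s : Nat, s ≤ moving →
        (cs.take (moving + 1)).drop s = (cs.take moving).drop s ++ [cs[moving]] := by
      intro s hs
      rw [List.take_add_one, List.getElem?_eq_getElem hm]
      simp only [Option.toList_some]
      rw [List.drop_append_of_le_length (by simp [List.length_take]; omega)]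
    rw [aLoop, dif_pos hm]
    by_cases hc : is_legal cs[moving] = true
    · -- legal char: extend the pending token
      rw [if_neg (fun h => h.1 hc), if_neg (fun h => h hc)]
      rw [ih cs start (moving + 1) acc (by omega) (by omega) (by omega)]
      rw [if_neg (show ¬ start = moving + 1 by omega)]
      by_cases hse : start = moving
      · subst hse
        rw [if_pos rfl, hdrop]
        conv_rhs => rw [bGroup]
        simp only [hc, if_true]
        rw [htake start le_rfl]
        have hnil : (cs.take start).drop start = [] := by
          apply List.drop_eq_nil_of_le; simp [List.length_take]
        simp [hnil]
      · rw [if_neg hse, hdrop,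
            List.takeWhile_cons_of_pos hc, List.dropWhile_cons_of_pos hc,
            htake start (by omega)]
        simp
    · by_cases he : moving = start
      · -- illegal char at a fresh start: skip it
        rw [if_pos ⟨hc, he⟩]
        rw [ih cs (moving + 1) (moving + 1) acc (by omega) le_rfl (by omega)]
        rw [if_pos rfl, if_pos he.symm, hdrop, bGroup_illegal_cons _ _ hc]
      · -- illegal char ending a pending token: emit it
        rw [if_neg (fun h => he h.2), if_pos hc]
        rw [ih cs (moving + 1) (moving + 1) _ (by omega) le_rfl (by omega)]
        rw [if_pos rfl, if_neg (fun h => he h.symm), hdrop]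
        rw [List.takeWhile_cons_of_neg (by simpa using hc),
            List.dropWhile_cons_of_neg (by simpa using hc)]
        rw [bGroup_illegal_cons _ _ hc]
        simp

-- ===== VERDICT (by name: the statement is the Claim_ definition above) =====
theorem divide_command_spec : Claim_equal_divide_command := by
  intro command _
  unfold Spec_divide_command divide_command divide_command_alt
  rw [aLoop_eq (command.toList.length) command.toList 0 0 [] rfl (Nat.le_refl 0)
        (Nat.zero_le _)]
  simp
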